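-- pv_equiv track=rewrite | github.com/Noethys/Noethysweb | noethysweb/facturation/utils/utils_export_cloe.py | Generer_fichier_texte
-- ===== SOURCE A (Python) =====
-- def Generer_fichier_texte(format_export=None, lignes=[]):
--     texte = []
--     for valeurs_ligne in lignes:
--         ligne = []
--         for code_colonne, nom_colonne, taille_colonne in format_export:
--             valeur = str(valeurs_ligne.get(code_colonne, "") or "")
--             ligne.append(valeur[:taille_colonne].ljust(taille_colonne))
--         texte.append("".join(ligne))
--     return "\n".join(texte)
-- ===== SOURCE B (Python) =====
-- def _cellule(valeurs_ligne, code, taille):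
--     v = str(valeurs_ligne.get(code, "") or "")[:taille]
--     return v + " " * (taille - len(v))
--
-- def Generer_fichier_texte(format_export=None, lignes=[]):
--     # Column-major: grow every row by one cell per column of the format.
--     rows = ["" for _ in lignes]
--     for code_colonne, nom_colonne, taille_colonne in format_export:
--         col = [_cellule(vl, code_colonne, taille_colonne) for vl in lignes]
--         rows = [r + c for r, c in zip(rows, col)]
--     return "\n".join(rows)
-- ===== Notes on version B (the rewrite author's own statement) =====
-- stated objective: alternative
-- what changed: Row-major nested loop (per line, append each padded cell, then join) is replaced by a column-major traversal: iterate the format once per column, compute that column's cells for all lines, and extend every row string by zipping; padding via slice-and-arithmetic instead of ljust.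
import Mathlib
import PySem

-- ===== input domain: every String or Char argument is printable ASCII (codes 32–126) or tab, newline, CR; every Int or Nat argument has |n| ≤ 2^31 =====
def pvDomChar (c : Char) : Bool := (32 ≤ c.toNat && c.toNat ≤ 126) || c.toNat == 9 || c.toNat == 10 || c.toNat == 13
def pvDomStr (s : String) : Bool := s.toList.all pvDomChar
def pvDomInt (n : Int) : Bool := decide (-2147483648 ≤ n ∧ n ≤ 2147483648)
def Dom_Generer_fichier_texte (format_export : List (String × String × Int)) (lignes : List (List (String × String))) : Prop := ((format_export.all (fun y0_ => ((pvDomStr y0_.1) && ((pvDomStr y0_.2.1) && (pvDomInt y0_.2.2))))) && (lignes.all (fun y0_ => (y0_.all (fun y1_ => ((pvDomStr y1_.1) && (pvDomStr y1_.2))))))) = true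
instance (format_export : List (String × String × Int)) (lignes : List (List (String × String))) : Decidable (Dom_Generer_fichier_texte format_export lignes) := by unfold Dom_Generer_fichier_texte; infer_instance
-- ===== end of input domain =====

-- B replaces A's row-major nested loop by a column-major traversal (one zip-extend of all
-- rows per format column); alternative decomposition, same cost. Return values proved equal.


-- ===== PORT A =====
-- s.ljust(w): pad with spaces on the right up to width w (no-op when w ≤ len(s))
def pvLjust (s : List Char) (w : Int) : List Char :=
  if w ≤ (s.length : Int) then s else s ++ List.replicate (w - (s.length : Int)).toNat ' '

def Generer_fichier_texte (format_export : List (String × String × Int)) (lignes : List (List (String × String))) : String :=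
  let texte := lignes.foldl (fun (texte : List (List Char)) valeurs_ligne =>
    let ligne := format_export.foldl (fun (ligne : List (List Char)) col =>
      -- valeur = str(valeurs_ligne.get(code_colonne, "") or "")  ('x or ""' on a str: "" stays "")
      let g := (PySem.Dict.ofList valeurs_ligne).getD col.1 ""
      let valeur := if g == "" then "" else g
      ligne ++ [pvLjust (PySem.List.slice valeur.toList none (some col.2.2)) col.2.2]) []
    texte ++ [PySem.Chars.join [] ligne]) []
  String.ofList (PySem.Chars.join ['\n'] texte)

-- ===== PORT B =====
-- one padded cell: v = str(vl.get(code, "") or "")[:taille]; v + " " * (taille - len(v))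
def pvCellule (valeurs_ligne : List (String × String)) (code : String) (taille : Int) : List Char :=
  let g := (PySem.Dict.ofList valeurs_ligne).getD code ""
  let v := PySem.List.slice (if g == "" then "" else g).toList none (some taille)
  v ++ List.replicate (taille - (v.length : Int)).toNat ' '

def Generer_fichier_texte_alt (format_export : List (String × String × Int)) (lignes : List (List (String × String))) : String :=
  let rows := format_export.foldl (fun (rows : List (List Char)) col =>
    let c := lignes.map (fun vl => pvCellule vl col.1 col.2.2)
    List.zipWith (fun r c => r ++ c) rows c) (lignes.map (fun _ => []))
  String.ofList (PySem.Chars.join ['\n'] rows)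

-- ===== PRECONDITION & SPEC =====
def Spec_Generer_fichier_texte (format_export : List (String × String × Int)) (lignes : List (List (String × String))) (out : String) : Prop := out = Generer_fichier_texte_alt format_export lignes
instance (format_export : List (String × String × Int)) (lignes : List (List (String × String))) (out : String) : Decidable (Spec_Generer_fichier_texte format_export lignes out) := by unfold Spec_Generer_fichier_texte; infer_instance

-- ===== CLAIM (what is proved, stated in full; the proofs are below) =====
def Claim_equal_Generer_fichier_texte : Prop := ∀ (format_export : List (String × String × Int)) (lignes : List (List (String × String))), Dom_Generer_fichier_texte format_export lignes → Spec_Generer_fichier_texte format_export lignes (Generer_fichier_texte format_export lignes)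

-- ===== LEMMAS AND PROOFS =====

-- ljust is always "append the missing spaces" (zero of them when already wide enough)
theorem pvLjust_eq_append (s : List Char) (w : Int) :
    pvLjust s w = s ++ List.replicate (w - (s.length : Int)).toNat ' ' := by
  unfold pvLjust
  split_ifs with h
  · have : (w - (s.length : Int)).toNat = 0 := by omega
    simp [this]
  · rfl

-- A's cell computation equals B's cell helper
theorem cellA_eq_cellule (vl : List (String × String)) (code : String) (t : Int) :
    pvLjust (PySem.List.slice (if ((PySem.Dict.ofList vl).getD code "") == "" then ""
        else (PySem.Dict.ofList vl).getD code "").toList none (some t)) t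
      = pvCellule vl code t := by
  unfold pvCellule
  rw [pvLjust_eq_append]

theorem zipWith_append_map_same {α β : Type} (l : List α) (g : α → List β) (h : α → List β) :
    List.zipWith (fun r c => r ++ c) (l.map g) (l.map h)
      = l.map (fun x => g x ++ h x) := by
  induction l with
  | nil => rfl
  | cons x xs ih => simp [ih]

theorem foldl_append_singleton_eq_map' {α β : Type} (l : List α) (f : α → β) :
    l.foldl (fun acc x => acc ++ [f x]) [] = l.map f := by
  have h : ∀ init : List β, l.foldl (fun acc x => acc ++ [f x]) init = init ++ l.map f := by
    induction l with
    | nil => intro init; simp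
    | cons x xs ih => intro init; simp [List.foldl, ih]
  simpa using h []

-- B's column-major fold, run from any row prefixes of the shape lignes.map g,
-- appends each line's remaining cells
theorem foldB_invariant (format_export : List (String × String × Int))
    (lignes : List (List (String × String))) :
    ∀ g : List (String × String) → List Char,
      format_export.foldl (fun (rows : List (List Char)) col =>
          List.zipWith (fun r c => r ++ c) rows
            (lignes.map (fun vl => pvCellule vl col.1 col.2.2))) (lignes.map g)
        = lignes.map (fun vl =>
            g vl ++ (format_export.map (fun col => pvCellule vl col.1 col.2.2)).flatten) := by
  induction format_export with
  | nil => intro g; simp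
  | cons col fe ih =>
      intro g
      simp only [List.foldl, List.map]
      rw [zipWith_append_map_same, ih (fun vl => g vl ++ pvCellule vl col.1 col.2.2)]
      simp [List.append_assoc]

-- A's row equals the flattened cell list
theorem rowA_eq (format_export : List (String × String × Int)) (vl : List (String × String)) :
    PySem.Chars.join []
      (format_export.foldl (fun (ligne : List (List Char)) col =>
        let g := (PySem.Dict.ofList vl).getD col.1 ""
        let valeur := if g == "" then "" else g
        ligne ++ [pvLjust (PySem.List.slice valeur.toList none (some col.2.2)) col.2.2]) [])
      = (format_export.map (fun col => pvCellule vl col.1 col.2.2)).flatten := by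
  rw [foldl_append_singleton_eq_map'
    (f := fun col : String × String × Int => pvLjust
      (PySem.List.slice (if ((PySem.Dict.ofList vl).getD col.1 "") == "" then ""
        else (PySem.Dict.ofList vl).getD col.1 "").toList none (some col.2.2)) col.2.2)]
  have : (format_export.map (fun col : String × String × Int => pvLjust
      (PySem.List.slice (if ((PySem.Dict.ofList vl).getD col.1 "") == "" then ""
        else (PySem.Dict.ofList vl).getD col.1 "").toList none (some col.2.2)) col.2.2))
      = format_export.map (fun col => pvCellule vl col.1 col.2.2) := by
    apply List.map_congr_left
    intro col _
    exact cellA_eq_cellule vl col.1 col.2.2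
  rw [this]
  induction (format_export.map (fun col => pvCellule vl col.1 col.2.2)) with
  | nil => rfl
  | cons p ps ih =>
      cases ps with
      | nil => simp [PySem.Chars.join_singleton]
      | cons q qs => simp_all [PySem.Chars.join_cons_cons]

-- ===== VERDICT (by name: the statement is the Claim_ definition above) =====
theorem Generer_fichier_texte_spec : Claim_equal_Generer_fichier_texte := by
  intro format_export lignes _
  unfold Spec_Generer_fichier_texte Generer_fichier_texte Generer_fichier_texte_alt
  simp only []
  rw [foldB_invariant format_export lignes (fun _ => []),
    foldl_append_singleton_eq_map' (f := fun vl => PySem.Chars.join []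
      (format_export.foldl (fun (ligne : List (List Char)) col =>
        let g := (PySem.Dict.ofList vl).getD col.1 ""
        let valeur := if g == "" then "" else g
        ligne ++ [pvLjust (PySem.List.slice valeur.toList none (some col.2.2)) col.2.2]) []))]
  congr 1
  apply congrArg
  apply List.map_congr_left
  intro vl _
  simpa using rowA_eq format_export vl
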